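-- pv_equiv track=rewrite | github.com/Garrylx/pycharm.lianxi | Lab of SoftWare/LAB11[recursion2]/6.py | palindrome_filter
-- ===== SOURCE A (Python) =====
-- def palindrome_filter(sentence):
--     if len(sentence) > 0:
--         tmp = sentence[0]
--         if tmp.isalpha() == True:
--             tmp = tmp.lower()
--             return tmp + palindrome_filter(sentence[1:])
--         else:
--             return palindrome_filter(sentence[1:])
--
--     else:
--         return ""
-- ===== SOURCE B (Python) =====
-- def palindrome_filter(sentence):
--     out = []
--     for ch in sentence:
--         if ch.isalpha():
--             out.append(ch.lower())
--     return "".join(out)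
-- ===== Notes on version B (the rewrite author's own statement) =====
-- stated objective: faster
-- what changed: Replaced the one-character-per-level recursion (each level copies sentence[1:], quadratic and RecursionError-prone) with a single iterative accumulator loop over the characters.
import Mathlib
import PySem

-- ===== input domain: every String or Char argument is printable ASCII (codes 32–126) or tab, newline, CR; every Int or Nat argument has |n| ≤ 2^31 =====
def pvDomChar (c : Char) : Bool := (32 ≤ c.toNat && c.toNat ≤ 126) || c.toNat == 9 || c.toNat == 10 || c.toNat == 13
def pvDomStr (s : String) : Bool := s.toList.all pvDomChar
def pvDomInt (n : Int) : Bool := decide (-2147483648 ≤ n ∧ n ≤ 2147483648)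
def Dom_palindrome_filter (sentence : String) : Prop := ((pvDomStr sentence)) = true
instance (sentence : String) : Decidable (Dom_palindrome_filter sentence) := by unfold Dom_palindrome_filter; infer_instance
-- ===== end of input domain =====

-- B replaces A's one-character-per-level recursion with a single iterative accumulator loop (simpler).

-- ===== PORT A =====
-- A recurses on sentence: head char, then sentence[1:]; keep lowercased letters.
def pfAChars : List Char → List Char
  | [] => []
  | c :: rest =>
    if PySem.Chars.isalpha c then PySem.Chars.lowerChar c :: pfAChars rest
    else pfAChars rest

def palindrome_filter (sentence : String) : String :=
  String.mk (pfAChars sentence.toList)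

-- ===== PORT B =====
-- B: for ch in sentence: if ch.isalpha(): out.append(ch.lower()); return "".join(out)
def palindrome_filter_alt (sentence : String) : String :=
  String.mk (sentence.toList.foldl
    (fun acc c => if PySem.Chars.isalpha c then acc ++ [PySem.Chars.lowerChar c] else acc) [])

-- ===== PRECONDITION & SPEC =====
def Spec_palindrome_filter (sentence : String) (out : String) : Prop := out = palindrome_filter_alt sentence
instance (sentence : String) (out : String) : Decidable (Spec_palindrome_filter sentence out) := by unfold Spec_palindrome_filter; infer_instance

-- ===== CLAIM (what is proved, stated in full; the proofs are below) =====
def Claim_equal_palindrome_filter : Prop := ∀ (sentence : String), Dom_palindrome_filter sentence → Spec_palindrome_filter sentence (palindrome_filter sentence)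

-- ===== LEMMAS AND PROOFS =====
theorem pfAChars_eq_filter_map (l : List Char) :
    pfAChars l = (l.filter PySem.Chars.isalpha).map PySem.Chars.lowerChar := by
  induction l with
  | nil => rfl
  | cons c rest ih =>
    simp only [pfAChars, List.filter_cons]
    by_cases h : PySem.Chars.isalpha c = true
    · simp [h, ih]
    · simp [h, ih]

-- ===== VERDICT (by name: the statement is the Claim_ definition above) =====
theorem palindrome_filter_spec : Claim_equal_palindrome_filter := by
  intro s _
  unfold Spec_palindrome_filter palindrome_filter palindrome_filter_alt
  rw [PySem.List.foldl_append_if, pfAChars_eq_filter_map]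
  simp
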